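-- pv_equiv track=rewrite | github.com/hot3246624/pm_as_ofi | scripts/self_check_completion_strategy.py | classify_breaks
-- ===== SOURCE A (Python) =====
-- def classify_breaks(missing_rounds):
--     streaks = []
--     if not missing_rounds:
--         return streaks
--     start = prev = missing_rounds[0]
--     for ts in missing_rounds[1:]:
--         if ts == prev + 300:
--             prev = ts
--             continue
--         streaks.append((start, prev, (prev - start) // 300 + 1))
--         start = prev = ts
--     streaks.append((start, prev, (prev - start) // 300 + 1))
--     return streaks
-- ===== SOURCE B (Python) =====
-- def classify_breaks(missing_rounds):
--     # Two staged passes: (1) compute boundary indices where the +300 chain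
--     # breaks, (2) slice by consecutive boundary pairs into summary tuples.
--     n = len(missing_rounds)
--     if n == 0:
--         return []
--     bounds = ([0]
--               + [i for i in range(1, n)
--                  if missing_rounds[i] != missing_rounds[i - 1] + 300]
--               + [n])
--     return [(missing_rounds[a], missing_rounds[b - 1], b - a)
--             for a, b in zip(bounds, bounds[1:])]
-- ===== Notes on version B (the rewrite author's own statement) =====
-- stated objective: alternative
-- what changed: Replaces A's single running-state pass (start/prev accumulator with floordiv count arithmetic) by two staged passes: first compute the list of boundary indices where the +300 chain breaks, then map over consecutive boundary pairs, reading each streak's first/last element and its length off the indices.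
import Mathlib
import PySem

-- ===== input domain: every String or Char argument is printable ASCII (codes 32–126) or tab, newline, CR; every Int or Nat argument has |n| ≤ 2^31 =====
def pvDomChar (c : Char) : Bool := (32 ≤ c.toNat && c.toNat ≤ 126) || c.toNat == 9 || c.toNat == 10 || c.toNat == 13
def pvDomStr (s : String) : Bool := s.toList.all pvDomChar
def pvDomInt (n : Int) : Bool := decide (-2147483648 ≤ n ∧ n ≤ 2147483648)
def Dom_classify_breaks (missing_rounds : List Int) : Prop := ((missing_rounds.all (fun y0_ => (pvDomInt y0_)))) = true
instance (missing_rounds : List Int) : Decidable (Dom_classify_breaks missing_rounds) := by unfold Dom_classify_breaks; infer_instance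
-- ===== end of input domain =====

-- B replaces A's single running-state pass by two staged passes: first the
-- boundary indices where the +300 chain breaks, then a map over consecutive
-- boundary pairs (alternative decomposition, same cost).

-- ===== PORT A =====
def pvStepA (s : List (Int × Int × Int) × Int × Int) (ts : Int) :
    List (Int × Int × Int) × Int × Int :=
  if ts = s.2.2 + 300 then (s.1, s.2.1, ts)
  else (s.1 ++ [(s.2.1, s.2.2, PySem.Int.floordiv (s.2.2 - s.2.1) 300 + 1)], ts, ts)

def classify_breaks (missing_rounds : List Int) : List (Int × Int × Int) :=
  match missing_rounds with
  | [] => []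
  | h :: t =>
    let s := t.foldl pvStepA ([], h, h)
    s.1 ++ [(s.2.1, s.2.2, PySem.Int.floordiv (s.2.2 - s.2.1) 300 + 1)]

-- ===== PORT B =====
def classify_breaks_alt (missing_rounds : List Int) : List (Int × Int × Int) :=
  let n : Int := PySem.List.len missing_rounds
  if n = 0 then []
  else
    let bounds : List Int :=
      [0] ++ (PySem.List.pyRange 1 n 1).filter
          (fun i => decide (PySem.List.pyGetD missing_rounds i 0 ≠
                            PySem.List.pyGetD missing_rounds (i - 1) 0 + 300))
        ++ [n]
    (bounds.zip (bounds.drop 1)).map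
      (fun p => (PySem.List.pyGetD missing_rounds p.1 0,
                 PySem.List.pyGetD missing_rounds (p.2 - 1) 0,
                 p.2 - p.1))

-- ===== PRECONDITION & SPEC =====
def Spec_classify_breaks (missing_rounds : List Int) (out : List (Int × Int × Int)) : Prop := out = classify_breaks_alt missing_rounds
instance (missing_rounds : List Int) (out : List (Int × Int × Int)) : Decidable (Spec_classify_breaks missing_rounds out) := by unfold Spec_classify_breaks; infer_instance

-- ===== CLAIM (what is proved, stated in full; the proofs are below) =====
def Claim_equal_classify_breaks : Prop := ∀ (missing_rounds : List Int), Dom_classify_breaks missing_rounds → Spec_classify_breaks missing_rounds (classify_breaks missing_rounds)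

-- ===== LEMMAS AND PROOFS =====

-- common reference value: the runs of the list, by structural recursion
def pvRuns : List Int → List (Int × Int × Int)
  | [] => []
  | h :: t =>
    match pvRuns t with
    | [] => [(h, h, 1)]
    | (a, b, c) :: rest =>
      if a = h + 300 then (h, b, c + 1) :: rest else (h, h, 1) :: (a, b, c) :: rest

lemma pvRuns_head (x : Int) (l : List Int) :
    ∃ b c rest, pvRuns (x :: l) = (x, b, c) :: rest := by
  show ∃ b c rest, (match pvRuns l with
    | [] => [(x, x, 1)]
    | (a, b, c) :: rest =>
      if a = x + 300 then (x, b, c + 1) :: rest else (x, x, 1) :: (a, b, c) :: rest) = (x, b, c) :: rest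
  rcases pvRuns l with _ | ⟨⟨a, b, c⟩, rest⟩
  · exact ⟨x, 1, [], rfl⟩
  · by_cases h : a = x + 300
    · exact ⟨b, c + 1, rest, by simp [h]⟩
    · exact ⟨x, 1, (a, b, c) :: rest, by simp [h]⟩

-- ----- A side -----
def pvAux (start prev : Int) : List Int → List (Int × Int × Int)
  | [] => [(start, prev, PySem.Int.floordiv (prev - start) 300 + 1)]
  | ts :: r =>
    if ts = prev + 300 then pvAux start ts r
    else (start, prev, PySem.Int.floordiv (prev - start) 300 + 1) :: pvAux ts ts r

def pvPatch (start m : Int) : List (Int × Int × Int) → List (Int × Int × Int)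
  | [] => []
  | (_, b, c) :: rest => (start, b, c + m) :: rest

lemma pv_foldA (t : List Int) (acc : List (Int × Int × Int)) (start prev : Int) :
    (let s := t.foldl pvStepA (acc, start, prev)
     s.1 ++ [(s.2.1, s.2.2, PySem.Int.floordiv (s.2.2 - s.2.1) 300 + 1)]) =
    acc ++ pvAux start prev t := by
  induction t generalizing acc start prev with
  | nil => simp [pvAux]
  | cons ts r ih =>
    by_cases hc : ts = prev + 300
    · have hstep : pvStepA (acc, start, prev) ts = (acc, start, ts) := by
        simp [pvStepA, hc]
      simp only [List.foldl_cons, hstep, pvAux, if_pos hc]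
      exact ih acc start ts
    · have hstep : pvStepA (acc, start, prev) ts
        = (acc ++ [(start, prev, PySem.Int.floordiv (prev - start) 300 + 1)], ts, ts) := by
        simp [pvStepA, hc]
      simp only [List.foldl_cons, hstep, pvAux, if_neg hc]
      rw [ih]
      simp

lemma pv_fd_mul (m : Int) : PySem.Int.floordiv (300 * m) 300 = m := by
  rw [PySem.Int.floordiv_eq_iff_of_pos (by norm_num)]
  constructor <;> nlinarith

lemma pv_aux_runs (t : List Int) (start prev m : Int) (h : prev - start = 300 * m) :
    pvAux start prev t = pvPatch start m (pvRuns (prev :: t)) := by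
  induction t generalizing start prev m with
  | nil =>
    simp only [pvAux, pvRuns, pvPatch, h, pv_fd_mul]
    norm_num [add_comm]
  | cons ts r ih =>
    by_cases hc : ts = prev + 300
    · have h' : ts - start = 300 * (m + 1) := by omega
      obtain ⟨b, c, rest, hr⟩ := pvRuns_head ts r
      have hrun : pvRuns (prev :: ts :: r) = (prev, b, c + 1) :: rest := by
        show (match pvRuns (ts :: r) with
          | [] => [(prev, prev, 1)]
          | (a, b, c) :: rest =>
            if a = prev + 300 then (prev, b, c + 1) :: rest
            else (prev, prev, 1) :: (a, b, c) :: rest) = _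
        rw [hr]; simp [hc]
      rw [show pvAux start prev (ts :: r) = pvAux start ts r by simp [pvAux, hc],
        ih start ts (m + 1) h', hrun, hr, pvPatch, pvPatch]
      norm_num
      omega
    · obtain ⟨b, c, rest, hr⟩ := pvRuns_head ts r
      have hrun : pvRuns (prev :: ts :: r) = (prev, prev, 1) :: pvRuns (ts :: r) := by
        show (match pvRuns (ts :: r) with
          | [] => [(prev, prev, 1)]
          | (a, b, c) :: rest =>
            if a = prev + 300 then (prev, b, c + 1) :: rest
            else (prev, prev, 1) :: (a, b, c) :: rest) = _
        rw [hr]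
        simp [hc]
      rw [show pvAux start prev (ts :: r) =
          (start, prev, PySem.Int.floordiv (prev - start) 300 + 1) :: pvAux ts ts r by
            simp [pvAux, hc],
        ih ts ts 0 (by omega), hrun, pvPatch, hr, pvPatch, h, pv_fd_mul]
      norm_num [add_comm]

lemma pv_A_runs (xs : List Int) : classify_breaks xs = pvRuns xs := by
  cases xs with
  | nil => rfl
  | cons h t =>
    have := pv_foldA t [] h h
    simp only [List.nil_append] at this
    rw [show classify_breaks (h :: t) =
        (let s := t.foldl pvStepA ([], h, h)
         s.1 ++ [(s.2.1, s.2.2, PySem.Int.floordiv (s.2.2 - s.2.1) 300 + 1)]) from rfl,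
      this, pv_aux_runs t h h 0 (by omega)]
    obtain ⟨b, c, rest, hr⟩ := pvRuns_head h t
    rw [hr, pvPatch]
    norm_num

-- ----- B side -----
def pvBN (xs : List Int) : List Nat :=
  (List.range (xs.length - 1)).filter
    (fun k => decide (xs.getD (k + 1) 0 ≠ xs.getD k 0 + 300))

def pvBoundsN (xs : List Int) : List Nat := 0 :: ((pvBN xs).map (· + 1) ++ [xs.length])

def pvF (xs : List Int) (p : Nat × Nat) : Int × Int × Int :=
  (xs.getD p.1 0, xs.getD (p.2 - 1) 0, (p.2 : Int) - (p.1 : Int))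

def pvOutN (xs : List Int) : List (Int × Int × Int) :=
  ((pvBoundsN xs).zip (pvBoundsN xs).tail).map (pvF xs)

lemma pv_alt_outN (xs : List Int) (hne : xs ≠ []) : classify_breaks_alt xs = pvOutN xs := by
  have hlen : 1 ≤ xs.length := by
    cases xs with
    | nil => exact absurd rfl hne
    | cons a l => simp
  have hn : (PySem.List.len xs) ≠ 0 := by
    simp only [PySem.List.len_eq]
    omega
  simp only [classify_breaks_alt]
  rw [if_neg hn]
  -- phase 1: the break indices are the Nat break indices, cast and shifted
  have hrange : PySem.List.pyRange 1 (PySem.List.len xs) 1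
      = (List.range (xs.length - 1)).map (fun k : Nat => 1 + (k : Int)) := by
    rw [PySem.List.pyRange_one]
    have ht : ((PySem.List.len xs) - 1).toNat = xs.length - 1 := by
      simp only [PySem.List.len_eq]
      omega
    rw [ht]
  have hfilter : (PySem.List.pyRange 1 (PySem.List.len xs) 1).filter
        (fun i => decide (PySem.List.pyGetD xs i 0 ≠ PySem.List.pyGetD xs (i - 1) 0 + 300))
      = (pvBN xs).map (fun k : Nat => 1 + (k : Int)) := by
    rw [hrange, List.filter_map]
    unfold pvBN
    congr 1
    apply List.filter_congr
    intro k hk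
    simp only [Function.comp_apply]
    have e1 : PySem.List.pyGetD xs (1 + (k : Int)) 0 = xs.getD (k + 1) 0 := by
      rw [show (1 : Int) + (k : Int) = ((k + 1 : Nat) : Int) by push_cast; ring,
        PySem.List.pyGetD_natCast]
    have e2 : PySem.List.pyGetD xs (1 + (k : Int) - 1) 0 = xs.getD k 0 := by
      rw [show (1 : Int) + (k : Int) - 1 = ((k : Nat) : Int) by omega,
        PySem.List.pyGetD_natCast]
    rw [e1, e2]
  rw [hfilter]
  -- phase 2: the Int bounds list is the cast of the Nat bounds list
  have hbounds : [(0 : Int)] ++ (pvBN xs).map (fun k : Nat => 1 + (k : Int)) ++ [PySem.List.len xs]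
      = (pvBoundsN xs).map (fun k : Nat => (k : Int)) := by
    unfold pvBoundsN
    simp only [PySem.List.len_eq, List.map_cons, List.map_append, List.map_map]
    simp only [List.cons_append, Nat.cast_zero]
    congr 1
    apply congrArg (· ++ [((xs.length : Nat) : Int)])
    apply List.map_congr_left
    intro k _
    simp only [Function.comp_apply]
    push_cast
    ring
  rw [hbounds]
  have hge : ∀ y ∈ (pvBoundsN xs).tail, 1 ≤ y := by
    unfold pvBoundsN
    intro y hy
    simp only [List.tail_cons] at hy
    rcases List.mem_append.1 hy with hy | hy
    · obtain ⟨x, -, rfl⟩ := List.mem_map.1 hy; omega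
    · simp at hy; omega
  rw [List.drop_one, ← List.map_tail, List.zip_map, List.map_map]
  unfold pvOutN
  apply List.map_congr_left
  intro p hp
  have hmem := (List.of_mem_zip hp).2
  have h1 : 1 ≤ p.2 := hge p.2 hmem
  simp only [Function.comp_apply, Prod.map, pvF]
  rw [show ((p.2 : Int)) - 1 = ((p.2 - 1 : Nat) : Int) by omega]
  simp

lemma pv_bn_cons (h : Int) (t : List Int) (hne : t ≠ []) :
    pvBN (h :: t) = (if t.getD 0 0 ≠ h + 300 then [0] else []) ++ (pvBN t).map (· + 1) := by
  obtain ⟨t0, t', rfl⟩ : ∃ t0 t', t = t0 :: t' := by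
    cases t with
    | nil => exact absurd rfl hne
    | cons t0 t' => exact ⟨t0, t', rfl⟩
  unfold pvBN
  simp only [List.length_cons, Nat.add_sub_cancel, List.range_succ_eq_map,
    List.filter_cons, List.filter_map]
  by_cases hb : (t0 :: t').getD 0 0 ≠ h + 300
  · rw [if_pos hb]
    simp only [List.getD_cons_succ, List.getD_cons_zero] at hb ⊢
    simp [hb, Function.comp_def]
    rfl
  · rw [if_neg hb]
    push Not at hb
    simp only [List.getD_cons_succ, List.getD_cons_zero] at hb ⊢
    simp [hb, Function.comp_def]
    rfl

lemma pv_sh (h : Int) (t : List Int) (l : List Nat) (a : Nat) (hl : ∀ y ∈ l, 1 ≤ y) :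
    (((a + 1) :: l.map (· + 1)).zip (l.map (· + 1))).map (pvF (h :: t)) =
    ((a :: l).zip l).map (pvF t) := by
  induction l generalizing a with
  | nil => simp
  | cons b r ih =>
    obtain ⟨b', rfl⟩ : ∃ b', b = b' + 1 := ⟨b - 1, by have := hl b (by simp); omega⟩
    simp only [List.map_cons, List.zip_cons_cons, List.map_cons]
    congr 1
    · simp [pvF]
    · exact ih (b' + 1) (fun y hy => hl y (by simp [hy]))

lemma pv_sh' (h : Int) (t : List Int) (l : List Nat) (hl : ∀ y ∈ l, 1 ≤ y) :
    ((1 :: l.map (· + 1)).zip (l.map (· + 1))).map (pvF (h :: t)) =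
    ((0 :: l).zip l).map (pvF t) :=
  pv_sh h t l 0 hl

lemma pv_outN_runs_aux (t : List Int) : ∀ h : Int, pvOutN (h :: t) = pvRuns (h :: t) := by
  induction t with
  | nil =>
    intro h
    simp [pvOutN, pvBoundsN, pvBN, pvF, pvRuns]
  | cons t0 t' ih =>
    intro h
    obtain ⟨b0, l'', hL2⟩ : ∃ b0 l'',
        (pvBN (t0 :: t')).map (· + 1) ++ [(t0 :: t').length] = b0 :: l'' := by
      rcases hq : (pvBN (t0 :: t')).map (· + 1) ++ [(t0 :: t').length] with _ | ⟨b0, l''⟩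
      · simp at hq
      · exact ⟨b0, l'', rfl⟩
    have hge : ∀ y ∈ b0 :: l'', 1 ≤ y := by
      rw [← hL2]
      intro y hy
      rcases List.mem_append.1 hy with hy | hy
      · obtain ⟨x, -, rfl⟩ := List.mem_map.1 hy; omega
      · simp at hy; omega
    have hExp : pvOutN (t0 :: t') =
        pvF (t0 :: t') (0, b0) :: ((b0 :: l'').zip l'').map (pvF (t0 :: t')) := by
      unfold pvOutN pvBoundsN
      rw [hL2]
      rfl
    have hIH := ih t0
    by_cases hc : t0 = h + 300
    · -- the +300 chain continues into the head
      have hbn : pvBN (h :: t0 :: t') = (pvBN (t0 :: t')).map (· + 1) := by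
        rw [pv_bn_cons h (t0 :: t') (by simp)]
        simp [hc]
      have hbounds : pvBoundsN (h :: t0 :: t') = 0 :: (b0 :: l'').map (· + 1) := by
        unfold pvBoundsN
        rw [hbn, ← hL2]
        simp
      have hout : pvOutN (h :: t0 :: t') =
          pvF (h :: t0 :: t') (0, b0 + 1) ::
            ((b0 :: l'').zip l'').map (pvF (t0 :: t')) := by
        unfold pvOutN
        rw [hbounds]
        simp only [List.map_cons, List.tail_cons, List.zip_cons_cons, List.map_cons]
        rw [pv_sh h (t0 :: t') l'' b0 (fun y hy => hge y (by simp [hy]))]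
      obtain ⟨b0', rfl⟩ : ∃ b0', b0 = b0' + 1 := ⟨b0 - 1, by have := hge b0 (by simp); omega⟩
      rw [hout]
      show _ = (match pvRuns (t0 :: t') with
        | [] => [(h, h, 1)]
        | (a, b, c) :: rest =>
          if a = h + 300 then (h, b, c + 1) :: rest else (h, h, 1) :: (a, b, c) :: rest)
      rw [← hIH, hExp]
      simp [pvF, hc]
    · -- a break between the head and the rest
      have hbn : pvBN (h :: t0 :: t') = 0 :: (pvBN (t0 :: t')).map (· + 1) := by
        rw [pv_bn_cons h (t0 :: t') (by simp)]
        simp [hc]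
      have hbounds : pvBoundsN (h :: t0 :: t') = 0 :: 1 :: (b0 :: l'').map (· + 1) := by
        unfold pvBoundsN
        rw [hbn, ← hL2]
        simp
      have hout : pvOutN (h :: t0 :: t') =
          pvF (h :: t0 :: t') (0, 1) :: pvOutN (t0 :: t') := by
        unfold pvOutN
        rw [hbounds]
        show pvF (h :: t0 :: t') (0, 1) ::
            ((1 :: (b0 :: l'').map (· + 1)).zip ((b0 :: l'').map (· + 1))).map
              (pvF (h :: t0 :: t')) = _
        rw [pv_sh' h (t0 :: t') (b0 :: l'') hge]
        unfold pvBoundsN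
        rw [hL2]
        rfl
      rw [hout]
      show _ = (match pvRuns (t0 :: t') with
        | [] => [(h, h, 1)]
        | (a, b, c) :: rest =>
          if a = h + 300 then (h, b, c + 1) :: rest else (h, h, 1) :: (a, b, c) :: rest)
      rw [← hIH, hExp]
      simp [pvF, hc]

lemma pv_outN_runs (xs : List Int) (hne : xs ≠ []) : pvOutN xs = pvRuns xs := by
  cases xs with
  | nil => exact absurd rfl hne
  | cons h t => exact pv_outN_runs_aux t h

-- ===== VERDICT (by name: the statement is the Claim_ definition above) =====
theorem classify_breaks_spec : Claim_equal_classify_breaks := by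
  intro xs _
  unfold Spec_classify_breaks
  cases hxs : xs with
  | nil => rfl
  | cons h t =>
    rw [pv_A_runs, pv_alt_outN _ (by simp), pv_outN_runs _ (by simp)]
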